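-- pv_equiv track=rewrite | github.com/lfteixeira996/Python_Courses | HolyPython/Intermediate/ex_9.py | name_adder
-- ===== SOURCE A (Python) =====
-- def name_adder(list):
--     i = 0
--     new_list = []
--     while i < len(list):
--         if list[i] != "":
--             new_list.append(list[i])
--         else:
--             break
--         i = i+1
--     return new_list
-- ===== SOURCE B (Python) =====
-- def name_adder(list):
--     try:
--         idx = list.index("")
--     except ValueError:
--         idx = len(list)
--     return list[:idx]
-- ===== Notes on version B (the rewrite author's own statement) =====
-- stated objective: simpler
-- what changed: Replaces the index-driven append-and-break while loop with locating the first empty string via list.index (falling back to len on ValueError) and returning the prefix slice.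
import Mathlib
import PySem

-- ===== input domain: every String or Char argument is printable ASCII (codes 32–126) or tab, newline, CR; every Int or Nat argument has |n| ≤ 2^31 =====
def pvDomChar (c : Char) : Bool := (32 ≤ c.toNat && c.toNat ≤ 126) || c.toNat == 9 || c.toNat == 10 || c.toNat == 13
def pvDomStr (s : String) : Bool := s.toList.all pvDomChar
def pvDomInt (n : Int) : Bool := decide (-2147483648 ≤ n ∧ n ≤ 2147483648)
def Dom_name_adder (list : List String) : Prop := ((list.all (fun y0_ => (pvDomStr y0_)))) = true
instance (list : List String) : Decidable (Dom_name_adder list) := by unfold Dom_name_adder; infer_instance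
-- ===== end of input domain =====

-- B replaces A's element-by-element append-and-break while loop by: find the index of the
-- first empty string (length of the list if absent) and return the prefix slice up to it.

-- ===== PORT A =====
-- while loop of A: index i, accumulator new_list; break when list[i] == ""
def nameAdderLoop (list : List String) (i : Nat) (acc : List String) : List String :=
  if _h : i < list.length then
    if PySem.List.pyGetD list (i : Int) "" ≠ "" then
      nameAdderLoop list (i + 1) (acc ++ [PySem.List.pyGetD list (i : Int) ""])
    else acc
  else acc
termination_by list.length - i

def name_adder (list : List String) : List String :=
  nameAdderLoop list 0 []

-- ===== PORT B =====
def name_adder_alt (list : List String) : List String :=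
  let idx : Int :=
    match PySem.List.index? list "" with
    | some k => (k : Int)
    | none => (list.length : Int)
  PySem.List.slice list none (some idx)

-- ===== PRECONDITION & SPEC =====
def Spec_name_adder (list : List String) (out : List String) : Prop := out = name_adder_alt list
instance (list : List String) (out : List String) : Decidable (Spec_name_adder list out) := by unfold Spec_name_adder; infer_instance

-- ===== CLAIM (what is proved, stated in full; the proofs are below) =====
def Claim_equal_name_adder : Prop := ∀ (list : List String), Dom_name_adder list → Spec_name_adder list (name_adder list)

-- ===== LEMMAS AND PROOFS =====

-- A's loop accumulates the takeWhile of the suffix starting at i.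
theorem nameAdderLoop_eq (list : List String) (i : Nat) (acc : List String) :
    nameAdderLoop list i acc = acc ++ (list.drop i).takeWhile (· ≠ "") := by
  induction hn : list.length - i using Nat.strong_induction_on generalizing i acc with
  | _ n ih =>
    unfold nameAdderLoop
    by_cases h : i < list.length
    · simp only [h, dif_pos]
      have hget : PySem.List.pyGetD list (i : Int) "" = list[i] :=
        PySem.List.pyGetD_ofNat (xs := list) (n := i) (d := "") h
      have hdrop : list.drop i = list[i] :: list.drop (i + 1) :=
        List.drop_eq_getElem_cons h
      by_cases he : list[i] = ""
      · simp [hget, he, hdrop]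
      · have : list.length - (i + 1) < n := by omega
        rw [if_pos (by simpa [hget] using he),
            ih _ this (i + 1) _ rfl, hdrop]
        rw [List.append_assoc]
        congr 1
        rw [List.takeWhile_cons]
        simp [he, hget]
    · have : list.drop i = [] := List.drop_eq_nil_of_le (by omega)
      simp [h, this]

-- B computes the same takeWhile: the prefix before the first empty string.
theorem name_adder_alt_eq (list : List String) :
    name_adder_alt list = list.takeWhile (· ≠ "") := by
  unfold name_adder_alt
  cases hidx : PySem.List.index? list "" with
  | none =>
    have hnot : "" ∉ list := (PySem.List.index?_eq_none_iff list "").1 hidx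
    simp only [PySem.List.slice_to_natCast]
    rw [List.take_length, List.takeWhile_eq_self_iff.2]
    intro x hx
    simp; intro h; exact hnot (h ▸ hx)
  | some k =>
    obtain ⟨pre, suf, rfl, hlen, hpre⟩ := (PySem.List.index?_eq_some_iff list "" k).1 hidx
    simp only [PySem.List.slice_to_natCast]
    subst hlen
    rw [List.take_left, List.takeWhile_append]
    have hall : ∀ x ∈ pre, decide (x ≠ "") = true := by
      intro x hx; simp; intro h; exact hpre (h ▸ hx)
    rw [List.takeWhile_eq_self_iff.2 hall]
    simp

-- ===== VERDICT (by name: the statement is the Claim_ definition above) =====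
theorem name_adder_spec : Claim_equal_name_adder := by
  intro list _
  unfold Spec_name_adder name_adder
  rw [nameAdderLoop_eq, name_adder_alt_eq]
  simp
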